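-- pv_equiv track=rewrite | github.com/OLMEL18/ax2009-html-report-flattener | src/ax2009_html_report_flattener/flattener.py | _combine_header_rows
-- ===== SOURCE A (Python) =====
-- def _combine_header_rows(parents: list[str], children: list[str]) -> list[str]:
--     width = max(len(parents), len(children))
--     parents = parents + [""] * (width - len(parents))
--     children = children + [""] * (width - len(children))
--     headers: list[str] = []
--     current_parent = ""
--     for parent, child in zip(parents, children, strict=True):
--         current_parent = parent or current_parent
--         if current_parent and child:
--             headers.append(f"{current_parent} {child}")
--         else:
--             headers.append(child or current_parent)
--     return headers
-- ===== SOURCE B (Python) =====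
-- def _combine_header_rows(parents: list[str], children: list[str]) -> list[str]:
--     width = max(len(parents), len(children))
--     ps = parents + [""] * (width - len(parents))
--     cs = children + [""] * (width - len(children))
--     out: list[str] = []
--     i = 0
--     while i < width:
--         p = ps[i]
--         if not p:
--             out.append(cs[i])
--             i += 1
--         else:
--             j = i + 1
--             while j < width and not ps[j]:
--                 j += 1
--             out.extend(f"{p} {c}" if c else p for c in cs[i:j])
--             i = j
--     return out
-- ===== Notes on version B (the rewrite author's own statement) =====
-- stated objective: alternative
-- what changed: Replaces A's element-wise loop that forward-fills a current_parent accumulator with a run scanner: an inner scan finds each maximal run of empty parents after a non-empty parent and the whole span of children is combined with that parent at once; children before any parent are emitted verbatim.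
import Mathlib
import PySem

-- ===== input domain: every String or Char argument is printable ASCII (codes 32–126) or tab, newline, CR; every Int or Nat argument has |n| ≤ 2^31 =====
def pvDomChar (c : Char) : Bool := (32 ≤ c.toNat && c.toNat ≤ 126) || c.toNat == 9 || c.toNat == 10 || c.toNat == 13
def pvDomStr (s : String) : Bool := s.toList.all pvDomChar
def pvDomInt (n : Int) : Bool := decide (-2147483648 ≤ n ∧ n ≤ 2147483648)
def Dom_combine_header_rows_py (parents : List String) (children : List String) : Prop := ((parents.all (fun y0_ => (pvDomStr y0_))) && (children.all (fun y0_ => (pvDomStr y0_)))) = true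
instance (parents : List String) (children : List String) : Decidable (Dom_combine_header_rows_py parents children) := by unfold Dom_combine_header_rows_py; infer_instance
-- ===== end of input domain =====

-- B replaces A's element-wise forward-fill accumulator loop by a run scanner that emits each
-- maximal span of empty parents in one go (objective: alternative decomposition, same O(n) cost).

-- ===== PORT A =====
-- A: pad both lists, then one fold carrying (current_parent, headers-so-far).
def combine_header_rows_py (parents : List String) (children : List String) : List String :=
  let width := max parents.length children.length
  let ps := parents ++ List.replicate (width - parents.length) ""
  let cs := children ++ List.replicate (width - children.length) ""
  let r := (ps.zip cs).foldl
    (fun (st : String × List String) pc =>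
      let cur := if pc.1 ≠ "" then pc.1 else st.1
      let h := if cur ≠ "" ∧ pc.2 ≠ "" then cur ++ " " ++ pc.2
               else if pc.2 ≠ "" then pc.2 else cur
      (cur, st.2 ++ [h]))
    ("", [])
  r.2

-- ===== PORT B =====
-- B's outer while loop over suffixes: an empty leading parent emits the child alone;
-- a non-empty parent p finds the run of following empty parents and emits p over that whole span.
def segB : List String → List String → List String
  | [], _ => []
  | p :: ps, cs =>
    if p = "" then cs.headD "" :: segB ps cs.tail
    else
      let run := ps.takeWhile (fun q => q = "")
      (cs.take (run.length + 1)).map (fun c => if c ≠ "" then p ++ " " ++ c else p)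
        ++ segB (ps.dropWhile (fun q => q = "")) (cs.drop (run.length + 1))
termination_by ps _ => ps.length
decreasing_by
  · simp
  · have := List.length_dropWhile_le (fun q => q = "") ps
    simp only [List.length_cons]; omega

def combine_header_rows_py_alt (parents : List String) (children : List String) : List String :=
  let width := max parents.length children.length
  let ps := parents ++ List.replicate (width - parents.length) ""
  let cs := children ++ List.replicate (width - children.length) ""
  segB ps cs

-- ===== PRECONDITION & SPEC =====
def Spec_combine_header_rows_py (parents : List String) (children : List String) (out : List String) : Prop := out = combine_header_rows_py_alt parents children
instance (parents : List String) (children : List String) (out : List String) : Decidable (Spec_combine_header_rows_py parents children out) := by unfold Spec_combine_header_rows_py; infer_instance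

-- ===== CLAIM (what is proved, stated in full; the proofs are below) =====
def Claim_equal_combine_header_rows_py : Prop := ∀ (parents : List String) (children : List String), Dom_combine_header_rows_py parents children → Spec_combine_header_rows_py parents children (combine_header_rows_py parents children)

-- ===== LEMMAS AND PROOFS =====

-- reference recursion: exactly one step of A's fold per element
def refA (cur : String) : List (String × String) → List String
  | [] => []
  | pc :: rest =>
      let cur2 := if pc.1 ≠ "" then pc.1 else cur
      (if cur2 ≠ "" ∧ pc.2 ≠ "" then cur2 ++ " " ++ pc.2
       else if pc.2 ≠ "" then pc.2 else cur2) :: refA cur2 rest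

lemma foldA_eq_refA (l : List (String × String)) :
    ∀ (cur : String) (acc : List String),
    (l.foldl
      (fun (st : String × List String) pc =>
        let c := if pc.1 ≠ "" then pc.1 else st.1
        let h := if c ≠ "" ∧ pc.2 ≠ "" then c ++ " " ++ pc.2
                 else if pc.2 ≠ "" then pc.2 else c
        (c, st.2 ++ [h]))
      (cur, acc)).2 = acc ++ refA cur l := by
  induction l with
  | nil => intro cur acc; simp [refA]
  | cons pc rest ih =>
    intro cur acc
    simp only [List.foldl_cons, refA]
    rw [ih]
    simp

-- over a block of empty parents, refA with a non-empty current parent p emits p over the span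
lemma refA_empty_run (p : String) (hp : p ≠ "") (rest : List String) :
    ∀ (ts : List String), (∀ x ∈ ts, x = "") → ∀ (cs : List String),
    refA p ((ts ++ rest).zip cs)
      = (cs.take ts.length).map (fun c => if c ≠ "" then p ++ " " ++ c else p)
        ++ refA p (rest.zip (cs.drop ts.length)) := by
  intro ts
  induction ts with
  | nil => intro _ cs; simp
  | cons t ts ih =>
    intro h cs
    have ht : t = "" := h t (List.mem_cons_self ..)
    cases cs with
    | nil => simp
    | cons c cs =>
      by_cases hc : c = "" <;>
        simp [refA, ht, hp, hc, ih (fun x hx => h x (List.mem_cons_of_mem _ hx)) cs]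

-- refA ignores cur when the first parent is non-empty
lemma refA_head_ne (cur cur' : String) (pc : String × String) (rest : List (String × String))
    (h : pc.1 ≠ "") : refA cur (pc :: rest) = refA cur' (pc :: rest) := by
  simp [refA, h]

lemma segB_eq_refA_aux (n : Nat) : ∀ (ps cs : List String), ps.length ≤ n →
    cs.length = ps.length → segB ps cs = refA "" (ps.zip cs) := by
  induction n with
  | zero =>
    intro ps cs hn hlen
    have hps : ps = [] := List.length_eq_zero_iff.mp (Nat.le_zero.mp hn)
    subst hps
    have hcs : cs = [] := (List.length_eq_zero_iff (l := cs)).mp (by simpa using hlen)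
    subst hcs
    simp [segB, refA]
  | succ n ih =>
    intro ps cs hn hlen
    cases ps with
    | nil =>
      have hcs : cs = [] := (List.length_eq_zero_iff (l := cs)).mp (by simpa using hlen)
      subst hcs
      simp [segB, refA]
    | cons p ps =>
      cases cs with
      | nil => simp at hlen
      | cons c cs =>
        simp only [List.length_cons] at hn hlen
        by_cases hp : p = ""
        · subst hp
          have ih' := ih ps cs (by omega) (by omega)
          by_cases hc : c = "" <;> simp [segB, refA, ih', hc]
        · have hts : ∀ x ∈ ps.takeWhile (fun q => q = ""), x = "" := by
            intro x hx
            simpa using List.mem_takeWhile_imp hx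
          have hdec : ps.takeWhile (fun q => q = "") ++ ps.dropWhile (fun q => q = "") = ps :=
            List.takeWhile_append_dropWhile
          have hlens : (ps.takeWhile (fun q => q = "")).length
              + (ps.dropWhile (fun q => q = "")).length = ps.length := by
            have h := congrArg List.length hdec
            rw [List.length_append] at h
            exact h
          simp only [segB, if_neg hp]
          have hstep : refA "" ((p :: ps).zip (c :: cs))
              = (if c ≠ "" then p ++ " " ++ c else p) :: refA p (ps.zip cs) := by
            by_cases hc : c = "" <;> simp [refA, hp, hc]
          rw [hstep]
          conv_rhs => rw [← hdec]
          rw [refA_empty_run p hp _ _ hts cs]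
          have hrest : refA p ((ps.dropWhile (fun q => q = "")).zip
                (cs.drop (ps.takeWhile (fun q => q = "")).length))
              = refA "" ((ps.dropWhile (fun q => q = "")).zip
                (cs.drop (ps.takeWhile (fun q => q = "")).length)) := by
            cases hd : ps.dropWhile (fun q => q = "") with
            | nil => simp [refA]
            | cons q qs =>
              have hq : q ≠ "" := by
                have := List.head?_dropWhile_not (fun q => q = "") ps
                rw [hd] at this
                simpa using this
              cases hcs : cs.drop (ps.takeWhile (fun q => q = "")).length with
              | nil => simp [refA]
              | cons d ds => exact refA_head_ne p "" (q, d) _ (by simpa using hq)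
          rw [hrest, ← ih (ps.dropWhile (fun q => q = ""))
              (cs.drop (ps.takeWhile (fun q => q = "")).length)
              (by omega)
              (by simp only [List.length_drop]; omega)]
          simp

lemma segB_eq_refA (ps cs : List String) (hlen : cs.length = ps.length) :
    segB ps cs = refA "" (ps.zip cs) :=
  segB_eq_refA_aux ps.length ps cs (le_refl _) hlen

-- ===== VERDICT (by name: the statement is the Claim_ definition above) =====
theorem combine_header_rows_py_spec : Claim_equal_combine_header_rows_py := by
  intro parents children _
  unfold Spec_combine_header_rows_py combine_header_rows_py combine_header_rows_py_alt
  rw [foldA_eq_refA, segB_eq_refA _ _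
    (by simp only [List.length_append, List.length_replicate]; omega)]
  simp
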